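-- pv_equiv track=rewrite | github.com/MohamedKharaev/UCI | ICS 31/Lab 9/lab9.py | tally_days_worked
-- ===== SOURCE A (Python) =====
-- def tally_days_worked(worked: 'List of str') -> dict:
--     '''takes as input the list described above and returns a dictionary where every key is a name of an employee and the value is the number of days that employee worked in the given week, according to the list'''
--     worked_dict = {}
--     for worker in worked:
--         if worker in worked_dict:
--             worked_dict[worker] += 1
--         else:
--             worked_dict[worker] = 1
--     return worked_dict
-- ===== SOURCE B (Python) =====
-- def tally_days_worked(worked: 'List of str') -> dict:
--     '''takes as input the list described above and returns a dictionary where every key is a name of an employee and the value is the number of days that employee worked in the given week, according to the list'''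
--     return {name: worked.count(name) for name in set(worked)}
-- ===== Notes on version B (the rewrite author's own statement) =====
-- stated objective: alternative
-- what changed: A's single accumulating dict pass is replaced by a two-phase shape: collect the distinct names with set(worked), then count each with worked.count(name) in a dict comprehension.
import Mathlib
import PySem

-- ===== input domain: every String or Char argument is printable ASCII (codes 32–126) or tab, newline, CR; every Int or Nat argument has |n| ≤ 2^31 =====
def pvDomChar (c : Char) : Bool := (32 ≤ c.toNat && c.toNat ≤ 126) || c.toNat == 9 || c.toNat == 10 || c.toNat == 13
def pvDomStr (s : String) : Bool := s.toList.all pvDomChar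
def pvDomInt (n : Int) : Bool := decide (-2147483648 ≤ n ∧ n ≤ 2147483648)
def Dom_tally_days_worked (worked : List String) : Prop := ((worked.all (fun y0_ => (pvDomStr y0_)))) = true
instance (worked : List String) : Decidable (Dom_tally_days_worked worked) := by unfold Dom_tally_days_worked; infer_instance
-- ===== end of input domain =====

-- B replaces A's single counting pass by collect-distinct-names-then-count-each (alternative decomposition, not faster; quadratic on many distinct names).

-- ===== PORT A =====
-- Port of A: one pass building a dict; 'if worker in d: d[worker]+=1 else: d[worker]=1'.
def tally_days_worked (worked : List String) : List (String × Int) :=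
  (worked.foldl
    (fun d worker =>
      if d.contains worker then d.insert worker (d.getD worker 0 + 1)
      else d.insert worker 1)
    PySem.Dict.empty).items

-- ===== PORT B =====
-- Port of B: distinct names via set(worked), then count each with worked.count(name).
def tally_days_worked_alt (worked : List String) : List (String × Int) :=
  (PySem.Set.ofList worked).map (fun name => (name, PySem.List.count worked name))

-- ===== PRECONDITION & SPEC =====
def Spec_tally_days_worked (worked : List String) (out : List (String × Int)) : Prop := out = tally_days_worked_alt worked
instance (worked : List String) (out : List (String × Int)) : Decidable (Spec_tally_days_worked worked out) := by unfold Spec_tally_days_worked; infer_instance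

-- ===== CLAIM (what is proved, stated in full; the proofs are below) =====
def Claim_equal_tally_days_worked : Prop := ∀ (worked : List String), Dom_tally_days_worked worked → Spec_tally_days_worked worked (tally_days_worked worked)

-- ===== LEMMAS AND PROOFS =====

-- A's loop body equals the canonical counter step on every reachable state.
lemma tally_loop_eq_counter (worked : List String) :
    worked.foldl
      (fun d worker =>
        if d.contains worker then d.insert worker (d.getD worker 0 + 1)
        else d.insert worker 1)
      PySem.Dict.empty = PySem.Dict.counter worked := by
  rw [← PySem.Dict.foldl_insert_getD_add_one_eq_counter]
  apply PySem.List.foldl_congr_mem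
  intro d worker _
  by_cases h : d.contains worker = true
  · simp [h]
  · simp only [Bool.not_eq_true] at h
    simp [h, PySem.Dict.getD_of_not_contains (h := h)]

-- ===== VERDICT (by name: the statement is the Claim_ definition above) =====
theorem tally_days_worked_spec : Claim_equal_tally_days_worked := by
  intro worked _
  unfold Spec_tally_days_worked tally_days_worked tally_days_worked_alt
  rw [tally_loop_eq_counter, PySem.Dict.items_counter]
  simp [PySem.List.count_eq]
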